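-- pv_equiv track=rewrite | github.com/rasha-salim/project-evaluation-agents | sprint_visualizations.py | create_sprint_timeline
-- ===== SOURCE A (Python) =====
-- def create_sprint_timeline(sprints, tasks):
--     """Create a sprint timeline visualization"""
--     # Group tasks by sprint
--     tasks_by_sprint = {}
--     for task in tasks:
--         sprint = task["Sprint"]
--         if sprint not in tasks_by_sprint:
--             tasks_by_sprint[sprint] = []
--         tasks_by_sprint[sprint].append(task)
--
--     # Create the HTML for the timeline
--     html = '''
--     <div style="margin-top: 20px; margin-bottom: 20px;">
--     '''
--
--     # Sort sprints by number
--     sorted_sprints = sorted(sprints, key=lambda x: x["Sprint"])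
--
--     # Create a timeline for each sprint
--     for i, sprint in enumerate(sorted_sprints):
--         sprint_num = sprint["Sprint"]
--         sprint_name = f"Sprint {sprint_num}"
--
--         # Generate a color based on the sprint number
--         hue = (i * 60) % 360
--         color = f"hsl({hue}, 70%, 65%)"
--
--         html += f'''
--         <div style="margin-bottom: 20px;">
--             <div style="display: flex; align-items: center;">
--                 <div style="background-color: {color}; color: white; padding: 10px 15px; border-radius: 5px; font-weight: bold; width: 100px; text-align: center;">{sprint_name}</div>
--                 <div style="height: 2px; background-color: {color}; flex-grow: 1; margin-left: 10px;"></div>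
--             </div>
--             <div style="margin-left: 20px; margin-top: 10px;">
--         '''
--
--         # Add tasks for this sprint
--         if sprint_name in tasks_by_sprint:
--             for j, task in enumerate(tasks_by_sprint[sprint_name]):
--                 html += f'''
--                 <div style="display: flex; align-items: center; margin-bottom: 8px;">
--                     <div style="width: 20px; height: 20px; background-color: {color}; border-radius: 50%; display: flex; align-items: center; justify-content: center; color: white; font-size: 12px; margin-right: 10px;">{j+1}</div>
--                     <div>{task["Task"]}</div>
--                 </div>
--                 '''
--
--         html += '''
--             </div>
--         </div>
--         '''
--
--     html += '</div>'
--
--     return html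
-- ===== SOURCE B (Python) =====
-- def create_sprint_timeline(sprints, tasks):
--     """Create a sprint timeline visualization (no grouping dict: filter tasks inline per sprint)"""
--     html = '''
--     <div style="margin-top: 20px; margin-bottom: 20px;">
--     '''
--
--     for i, sprint in enumerate(sorted(sprints, key=lambda x: x["Sprint"])):
--         sprint_name = f"Sprint {sprint['Sprint']}"
--         hue = (i * 60) % 360
--         color = f"hsl({hue}, 70%, 65%)"
--
--         html += f'''
--         <div style="margin-bottom: 20px;">
--             <div style="display: flex; align-items: center;">
--                 <div style="background-color: {color}; color: white; padding: 10px 15px; border-radius: 5px; font-weight: bold; width: 100px; text-align: center;">{sprint_name}</div>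
--                 <div style="height: 2px; background-color: {color}; flex-grow: 1; margin-left: 10px;"></div>
--             </div>
--             <div style="margin-left: 20px; margin-top: 10px;">
--         '''
--
--         for j, task in enumerate(t for t in tasks if t["Sprint"] == sprint_name):
--             html += f'''
--                 <div style="display: flex; align-items: center; margin-bottom: 8px;">
--                     <div style="width: 20px; height: 20px; background-color: {color}; border-radius: 50%; display: flex; align-items: center; justify-content: center; color: white; font-size: 12px; margin-right: 10px;">{j+1}</div>
--                     <div>{task["Task"]}</div>
--                 </div>
--                 '''
--
--         html += '''
--             </div>
--         </div>
--         '''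
--
--     return html + '</div>'
-- ===== Notes on version B (the rewrite author's own statement) =====
-- stated objective: simpler
-- what changed: B drops A's grouping-dict pass and membership check entirely and instead selects each sprint's tasks by filtering the task list inline per sprint, appending the same HTML fragments.
-- outside the precondition, e.g. on create_sprint_timeline([{'Sprint': '1'}], [{'Task': 'x'}]): A raises KeyError, B raises KeyError; on create_sprint_timeline([{}], []): A raises KeyError, B raises KeyError; on create_sprint_timeline([{'Sprint': '1'}], [{'Sprint': 'Sprint 1'}]): A raises KeyError, B raises KeyError
import Mathlib
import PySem

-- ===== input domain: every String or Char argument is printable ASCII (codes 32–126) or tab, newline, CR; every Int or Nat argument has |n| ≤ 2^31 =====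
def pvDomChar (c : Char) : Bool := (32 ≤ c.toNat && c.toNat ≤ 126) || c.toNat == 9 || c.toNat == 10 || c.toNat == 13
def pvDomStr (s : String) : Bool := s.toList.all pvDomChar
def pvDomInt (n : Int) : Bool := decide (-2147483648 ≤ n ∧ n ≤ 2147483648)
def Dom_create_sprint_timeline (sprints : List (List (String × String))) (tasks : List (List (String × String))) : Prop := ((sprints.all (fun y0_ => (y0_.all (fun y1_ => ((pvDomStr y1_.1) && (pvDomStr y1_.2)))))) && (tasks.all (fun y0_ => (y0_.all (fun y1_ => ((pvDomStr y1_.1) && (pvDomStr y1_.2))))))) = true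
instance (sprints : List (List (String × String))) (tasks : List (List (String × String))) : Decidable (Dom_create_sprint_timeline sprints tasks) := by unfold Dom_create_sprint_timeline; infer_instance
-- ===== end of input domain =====

-- B drops A's grouping dict and instead filters the task list inline per sprint; the HTML fragments are identical in both.

-- shared helpers: d[k] (total form; Pre_ guarantees the key is present), and the f-string fragments both Pythons share verbatim
def pvLookup (d : List (String × String)) (k : String) : String :=
  ((PySem.Dict.ofList d).get? k).getD ""

def headFrag : String := "\n    <div style=\"margin-top: 20px; margin-bottom: 20px;\">\n    "

def sprintFrag (color name : String) : String :=
  "\n        <div style=\"margin-bottom: 20px;\">\n            <div style=\"display: flex; align-items: center;\">\n                <div style=\"background-color: " ++ color ++ "; color: white; padding: 10px 15px; border-radius: 5px; font-weight: bold; width: 100px; text-align: center;\">" ++ name ++ "</div>\n                <div style=\"height: 2px; background-color: " ++ color ++ "; flex-grow: 1; margin-left: 10px;\"></div>\n            </div>\n            <div style=\"margin-left: 20px; margin-top: 10px;\">\n        "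

def taskFrag (color num task : String) : String :=
  "\n                <div style=\"display: flex; align-items: center; margin-bottom: 8px;\">\n                    <div style=\"width: 20px; height: 20px; background-color: " ++ color ++ "; border-radius: 50%; display: flex; align-items: center; justify-content: center; color: white; font-size: 12px; margin-right: 10px;\">" ++ num ++ "</div>\n                    <div>" ++ task ++ "</div>\n                </div>\n                "

def footFrag : String := "\n            </div>\n        </div>\n        "

-- ===== PORT A =====
-- A's grouping-loop body: if sprint not in d: d[sprint] = []; d[sprint].append(task)
def groupStep (d : PySem.Dict String (List (List (String × String)))) (task : List (String × String)) :
    PySem.Dict String (List (List (String × String))) :=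
  let sprint := pvLookup task "Sprint"
  let d := if d.contains sprint then d else d.insert sprint []
  d.modify sprint [] (fun l => l ++ [task])

-- the inner task loop body (shared f-string fragment)
def taskStep (color : String) (h : String) (q : Int × List (String × String)) : String :=
  h ++ taskFrag color (PySem.Int.toStr (q.1 + 1)) (pvLookup q.2 "Task")

-- A's per-sprint loop body
def sprintStepA (tasks_by_sprint : PySem.Dict String (List (List (String × String))))
    (html : String) (p : Int × List (String × String)) : String :=
  let sprint_num := pvLookup p.2 "Sprint"
  let sprint_name := "Sprint " ++ sprint_num
  let hue := PySem.Int.mod (p.1 * 60) 360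
  let color := "hsl(" ++ PySem.Int.toStr hue ++ ", 70%, 65%)"
  let html := html ++ sprintFrag color sprint_name
  let html :=
    if tasks_by_sprint.contains sprint_name then
      (PySem.List.enumerate (tasks_by_sprint.getD sprint_name []) 0).foldl (taskStep color) html
    else html
  html ++ footFrag

def create_sprint_timeline (sprints : List (List (String × String))) (tasks : List (List (String × String))) : String :=
  let tasks_by_sprint := tasks.foldl groupStep (PySem.Dict.empty)
  let html := headFrag
  let sorted_sprints := PySem.List.sorted sprints (fun x => pvLookup x "Sprint") false
  let html := (PySem.List.enumerate sorted_sprints 0).foldl (sprintStepA tasks_by_sprint) html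
  html ++ "</div>"

-- ===== PORT B =====
-- B's per-sprint loop body: filter the task list inline instead of a dict lookup
def sprintStepB (tasks : List (List (String × String)))
    (html : String) (p : Int × List (String × String)) : String :=
  let sprint_name := "Sprint " ++ pvLookup p.2 "Sprint"
  let hue := PySem.Int.mod (p.1 * 60) 360
  let color := "hsl(" ++ PySem.Int.toStr hue ++ ", 70%, 65%)"
  let html := html ++ sprintFrag color sprint_name
  let html := (PySem.List.enumerate (tasks.filter (fun t => pvLookup t "Sprint" == sprint_name)) 0).foldl
    (taskStep color) html
  html ++ footFrag

def create_sprint_timeline_alt (sprints : List (List (String × String))) (tasks : List (List (String × String))) : String :=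
  let html := headFrag
  let html := (PySem.List.enumerate (PySem.List.sorted sprints (fun x => pvLookup x "Sprint") false) 0).foldl
    (sprintStepB tasks) html
  html ++ "</div>"

-- ===== PRECONDITION & SPEC =====
-- Pre_ excludes exactly the KeyError inputs: a sprint without a "Sprint" key, a task without a "Sprint" key,
-- or a task whose sprint matches a listed sprint but which lacks the "Task" key — A raises KeyError on all of those.
def Pre_create_sprint_timeline (sprints : List (List (String × String))) (tasks : List (List (String × String))) : Prop :=
  (∀ s ∈ sprints, "Sprint" ∈ s.map Prod.fst) ∧
  (∀ t ∈ tasks, "Sprint" ∈ t.map Prod.fst) ∧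
  (∀ t ∈ tasks, (∃ s ∈ sprints, pvLookup t "Sprint" = "Sprint " ++ pvLookup s "Sprint") → "Task" ∈ t.map Prod.fst)

instance (sprints : List (List (String × String))) (tasks : List (List (String × String))) : Decidable (Pre_create_sprint_timeline sprints tasks) := by unfold Pre_create_sprint_timeline; infer_instance

def pvWitness_create_sprint_timeline : (List (List (String × String))) × (List (List (String × String))) :=
  ([[("Sprint", "1")], [("Sprint", "2")]],
   [[("Sprint", "Sprint 1"), ("Task", "Design")], [("Sprint", "Sprint 1"), ("Task", "Build")], [("Sprint", "other"), ("X", "y")]])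

def Spec_create_sprint_timeline (sprints : List (List (String × String))) (tasks : List (List (String × String))) (out : String) : Prop := out = create_sprint_timeline_alt sprints tasks
instance (sprints : List (List (String × String))) (tasks : List (List (String × String))) (out : String) : Decidable (Spec_create_sprint_timeline sprints tasks out) := by unfold Spec_create_sprint_timeline; infer_instance

-- ===== CLAIM (what is proved, stated in full; the proofs are below) =====
def Claim_equal_create_sprint_timeline : Prop := ∀ (sprints : List (List (String × String))) (tasks : List (List (String × String))), Dom_create_sprint_timeline sprints tasks → Pre_create_sprint_timeline sprints tasks → Spec_create_sprint_timeline sprints tasks (create_sprint_timeline sprints tasks)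

-- ===== LEMMAS AND PROOFS =====

set_option maxHeartbeats 1000000

-- one grouping step: the entry for s gains t exactly when t's sprint is s
theorem step_getD (d : PySem.Dict String (List (List (String × String)))) (t : List (String × String)) (s : String) :
    (groupStep d t).getD s [] =
      if s = pvLookup t "Sprint" then d.getD s [] ++ [t] else d.getD s [] := by
  dsimp only [groupStep]
  by_cases hc : d.contains (pvLookup t "Sprint") = true
  · rw [if_pos hc]
    by_cases h : s = pvLookup t "Sprint"
    · subst h; simp [pysem]
    · simp [pysem, h]
  · rw [if_neg hc]
    have hc' : d.contains (pvLookup t "Sprint") = false := by simpa using hc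
    by_cases h : s = pvLookup t "Sprint"
    · subst h; simp [pysem, hc']
    · simp [pysem, h]

theorem step_contains (d : PySem.Dict String (List (List (String × String)))) (t : List (String × String)) (s : String) :
    (groupStep d t).contains s = (s == pvLookup t "Sprint" || d.contains s) := by
  dsimp only [groupStep]
  by_cases hc : d.contains (pvLookup t "Sprint") = true
  · rw [if_pos hc]
    by_cases h : s = pvLookup t "Sprint"
    · subst h
      simp [pysem] at hc
      simp [pysem, hc]
    · simp [pysem, h]
  · rw [if_neg hc]
    by_cases h : s = pvLookup t "Sprint"
    · subst h; simp [pysem]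
    · simp [pysem, h]

-- the grouped dict's entry for s is exactly the in-order filter of the tasks with sprint s
theorem grp_getD (ts : List (List (String × String))) (d : PySem.Dict String (List (List (String × String)))) (s : String) :
    (ts.foldl groupStep d).getD s [] =
      d.getD s [] ++ ts.filter (fun t => pvLookup t "Sprint" == s) := by
  induction ts generalizing d with
  | nil => simp
  | cons t ts ih =>
    simp only [List.foldl_cons, List.filter_cons, ih, step_getD]
    by_cases h : pvLookup t "Sprint" = s
    · subst h; simp
    · have h' : ¬ s = pvLookup t "Sprint" := fun e => h e.symm
      simp [h, h']

theorem grp_contains (ts : List (List (String × String))) (d : PySem.Dict String (List (List (String × String)))) (s : String) :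
    (ts.foldl groupStep d).contains s =
      (d.contains s || ts.any (fun t => pvLookup t "Sprint" == s)) := by
  induction ts generalizing d with
  | nil => simp
  | cons t ts ih =>
    simp only [List.foldl_cons, List.any_cons, ih, step_contains]
    by_cases h : pvLookup t "Sprint" = s
    · subst h; simp
    · have hb : (pvLookup t "Sprint" == s) = false := by simp [h]
      have h' : ¬ s = pvLookup t "Sprint" := fun e => h (Eq.symm e)
      have hb2 : (s == pvLookup t "Sprint") = false := by simp [h']
      simp [hb, hb2]

-- A's guarded lookup-loop equals B's filter-loop, for any sprint name
theorem inner_eq (tasks : List (List (String × String))) (s color html : String) :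
    (if (tasks.foldl groupStep PySem.Dict.empty).contains s then
        (PySem.List.enumerate ((tasks.foldl groupStep PySem.Dict.empty).getD s []) 0).foldl (taskStep color) html
      else html)
    = (PySem.List.enumerate (tasks.filter (fun t => pvLookup t "Sprint" == s)) 0).foldl (taskStep color) html := by
  rw [grp_getD, grp_contains]
  simp only [PySem.Dict.contains_empty, PySem.Dict.getD_empty, Bool.false_or, List.nil_append]
  by_cases h : tasks.any (fun t => pvLookup t "Sprint" == s) = true
  · simp [h]
  · have h0 : tasks.any (fun t => pvLookup t "Sprint" == s) = false := by simpa using h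
    have hf : tasks.filter (fun t => pvLookup t "Sprint" == s) = [] := by
      rw [List.filter_eq_nil_iff]
      intro t ht
      simpa using List.any_eq_false.mp h0 t ht
    simp [h0, hf]

-- the two per-sprint loop bodies agree, hence the whole loops do
theorem sprintStep_eq (tasks : List (List (String × String))) (html : String) (p : Int × List (String × String)) :
    sprintStepA (tasks.foldl groupStep PySem.Dict.empty) html p = sprintStepB tasks html p := by
  dsimp only [sprintStepA, sprintStepB]
  congr 1
  exact inner_eq tasks _ _ _

theorem outer_eq (tasks : List (List (String × String))) (l : List (Int × List (String × String))) (init : String) :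
    l.foldl (sprintStepA (tasks.foldl groupStep PySem.Dict.empty)) init = l.foldl (sprintStepB tasks) init := by
  induction l generalizing init with
  | nil => rfl
  | cons p l ih => rw [List.foldl_cons, List.foldl_cons, sprintStep_eq, ih]

-- ===== VERDICT (by name: the statement is the Claim_ definition above) =====
theorem create_sprint_timeline_spec : Claim_equal_create_sprint_timeline := by
  intro sprints tasks _ _
  unfold Spec_create_sprint_timeline create_sprint_timeline create_sprint_timeline_alt
  exact congrArg (fun x => x ++ "</div>") (outer_eq tasks _ headFrag)
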